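-- pv_equiv track=rewrite | github.com/eddyjiang55/AlphaResume | backend/pyScripts/utlis.py | split_cv_into_twoparts
-- ===== SOURCE A (Python) =====
-- def split_cv_into_twoparts(improved_cv_json):
--     key_list = list(improved_cv_json.keys())
--     first_cv_part = key_list[:4]
--     second_cv_part = key_list[4:]
--     first_cv_json = {}
--     second_cv_json = {}
--     for key, value in improved_cv_json.items():
--         if key in first_cv_part:
--             first_cv_json[key] = value
--         elif key in second_cv_part:
--             second_cv_json[key] = value
--
--     return (first_cv_json, second_cv_json)
-- ===== SOURCE B (Python) =====
-- def split_cv_into_twoparts(improved_cv_json):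
--     items = list(improved_cv_json.items())
--     return (dict(items[:4]), dict(items[4:]))
-- ===== Notes on version B (the rewrite author's own statement) =====
-- stated objective: faster
-- what changed: B materialises the items list once and builds each sub-dict directly from a slice (items[:4], items[4:]) instead of looping over all entries and testing each key for membership in two key slices; the loop and both membership scans disappear.
import Mathlib
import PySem

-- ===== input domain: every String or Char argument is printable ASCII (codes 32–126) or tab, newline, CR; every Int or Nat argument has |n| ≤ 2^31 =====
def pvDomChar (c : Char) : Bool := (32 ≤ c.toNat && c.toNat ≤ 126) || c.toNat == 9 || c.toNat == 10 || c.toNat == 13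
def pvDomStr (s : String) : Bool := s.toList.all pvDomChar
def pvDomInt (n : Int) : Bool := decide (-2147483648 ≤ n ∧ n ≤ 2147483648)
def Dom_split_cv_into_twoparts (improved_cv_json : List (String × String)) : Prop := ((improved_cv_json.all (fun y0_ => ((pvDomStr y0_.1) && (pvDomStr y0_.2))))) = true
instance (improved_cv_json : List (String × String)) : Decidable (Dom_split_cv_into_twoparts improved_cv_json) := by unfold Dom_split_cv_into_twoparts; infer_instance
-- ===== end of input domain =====

-- B builds the two sub-dicts directly from slices of the items list, dropping the per-entry membership scans (objective: faster, measured).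

-- ===== PORT A =====
def split_cv_into_twoparts (improved_cv_json : List (String × String)) : (List (String × String)) × (List (String × String)) :=
  let key_list := improved_cv_json.map Prod.fst
  let first_cv_part := PySem.List.slice key_list none (some 4)
  let second_cv_part := PySem.List.slice key_list (some 4) none
  let r := improved_cv_json.foldl
    (fun (acc : PySem.Dict String String × PySem.Dict String String) kv =>
      if first_cv_part.contains kv.1 then (acc.1.insert kv.1 kv.2, acc.2)
      else if second_cv_part.contains kv.1 then (acc.1, acc.2.insert kv.1 kv.2)
      else acc)
    (PySem.Dict.empty, PySem.Dict.empty)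
  (r.1.items, r.2.items)

-- ===== PORT B =====
def split_cv_into_twoparts_alt (improved_cv_json : List (String × String)) : (List (String × String)) × (List (String × String)) :=
  let items := improved_cv_json
  ((PySem.Dict.ofList (PySem.List.slice items none (some 4))).items,
   (PySem.Dict.ofList (PySem.List.slice items (some 4) none)).items)

-- ===== PRECONDITION & SPEC =====
-- Pre_ excludes association lists with duplicate keys: they do not arise from a Python dict argument,
-- and on them A's overwrite-in-place and B's plain slicing are both defensible, accidental behaviours.
def Pre_split_cv_into_twoparts (improved_cv_json : List (String × String)) : Prop :=
  (improved_cv_json.map Prod.fst).Nodup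
instance (improved_cv_json : List (String × String)) : Decidable (Pre_split_cv_into_twoparts improved_cv_json) := by unfold Pre_split_cv_into_twoparts; infer_instance

def pvWitness_split_cv_into_twoparts : (List (String × String)) :=
  [("name", "Ed"), ("email", "e@x.io"), ("phone", "1"), ("summary", "dev"), ("skills", "Lean")]

def Spec_split_cv_into_twoparts (improved_cv_json : List (String × String)) (out : (List (String × String)) × (List (String × String))) : Prop := out = split_cv_into_twoparts_alt improved_cv_json
instance (improved_cv_json : List (String × String)) (out : (List (String × String)) × (List (String × String))) : Decidable (Spec_split_cv_into_twoparts improved_cv_json out) := by unfold Spec_split_cv_into_twoparts; infer_instance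

-- ===== CLAIM (what is proved, stated in full; the proofs are below) =====
def Claim_equal_split_cv_into_twoparts : Prop := ∀ (improved_cv_json : List (String × String)), Dom_split_cv_into_twoparts improved_cv_json → Pre_split_cv_into_twoparts improved_cv_json → Spec_split_cv_into_twoparts improved_cv_json (split_cv_into_twoparts improved_cv_json)

-- ===== LEMMAS AND PROOFS =====

-- A's loop over a block whose keys all pass the first membership test only touches the first dict.
lemma loop_first (first second : List String) (xs : List (String × String))
    (d1 d2 : PySem.Dict String String)
    (h : ∀ kv ∈ xs, first.contains kv.1 = true) :
    xs.foldl
      (fun (acc : PySem.Dict String String × PySem.Dict String String) kv =>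
        if first.contains kv.1 then (acc.1.insert kv.1 kv.2, acc.2)
        else if second.contains kv.1 then (acc.1, acc.2.insert kv.1 kv.2)
        else acc) (d1, d2)
    = (xs.foldl (fun d kv => d.insert kv.1 kv.2) d1, d2) := by
  induction xs generalizing d1 with
  | nil => rfl
  | cons kv xs ih =>
      simp only [List.foldl_cons, h kv (by simp), if_true]
      exact ih _ (fun p hp => h p (by simp [hp]))

-- A's loop over a block whose keys all fail the first test and pass the second only touches the second dict.
lemma loop_second (first second : List String) (xs : List (String × String))
    (d1 d2 : PySem.Dict String String)
    (h1 : ∀ kv ∈ xs, first.contains kv.1 = false)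
    (h2 : ∀ kv ∈ xs, second.contains kv.1 = true) :
    xs.foldl
      (fun (acc : PySem.Dict String String × PySem.Dict String String) kv =>
        if first.contains kv.1 then (acc.1.insert kv.1 kv.2, acc.2)
        else if second.contains kv.1 then (acc.1, acc.2.insert kv.1 kv.2)
        else acc) (d1, d2)
    = (d1, xs.foldl (fun d kv => d.insert kv.1 kv.2) d2) := by
  induction xs generalizing d2 with
  | nil => rfl
  | cons kv xs ih =>
      simp only [List.foldl_cons, h1 kv (by simp), h2 kv (by simp), if_true, if_false,
        Bool.false_eq_true]
      exact ih _ (fun p hp => h1 p (by simp [hp])) (fun p hp => h2 p (by simp [hp]))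

-- ===== VERDICT (by name: the statement is the Claim_ definition above) =====

theorem split_cv_into_twoparts_spec : Claim_equal_split_cv_into_twoparts := by
  intro l _ hpre
  unfold Spec_split_cv_into_twoparts split_cv_into_twoparts split_cv_into_twoparts_alt
  have h4 : PySem.List.slice (l.map Prod.fst) none (some 4) = (l.map Prod.fst).take 4 := by
    have := PySem.List.slice_to_natCast (xs := l.map Prod.fst) (b := 4); simpa using this
  have h4' : PySem.List.slice (l.map Prod.fst) (some 4) none = (l.map Prod.fst).drop 4 := by
    have := PySem.List.slice_from_natCast (xs := l.map Prod.fst) (a := 4); simpa using this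
  have hl4 : PySem.List.slice l none (some 4) = l.take 4 := by
    have := PySem.List.slice_to_natCast (xs := l) (b := 4); simpa using this
  have hl4' : PySem.List.slice l (some 4) none = l.drop 4 := by
    have := PySem.List.slice_from_natCast (xs := l) (a := 4); simpa using this
  simp only [h4, h4', hl4, hl4']
  have hsplit : l = l.take 4 ++ l.drop 4 := (List.take_append_drop 4 l).symm
  have hnd : ((l.take 4).map Prod.fst ++ (l.drop 4).map Prod.fst).Nodup := by
    have heq : l.map Prod.fst = (l.take 4).map Prod.fst ++ (l.drop 4).map Prod.fst := by
      rw [← List.map_append, List.take_append_drop]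
    rw [← heq]; exact hpre
  have hdisj := List.disjoint_of_nodup_append hnd
  -- abstract the two membership lists, then split the fold over l = take 4 ++ drop 4
  set F := (l.map Prod.fst).take 4 with hF
  set S := (l.map Prod.fst).drop 4 with hS
  have hFt : F = (l.take 4).map Prod.fst := by rw [hF, List.map_take]
  have hSd : S = (l.drop 4).map Prod.fst := by rw [hS, List.map_drop]
  have hA : ∀ kv ∈ l.take 4, F.contains kv.1 = true := by
    intro kv hkv; rw [hFt]
    exact List.contains_iff_mem.mpr (List.mem_map_of_mem hkv)
  have hB : ∀ kv ∈ l.drop 4, F.contains kv.1 = false := by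
    intro kv hkv; rw [hFt]
    by_contra hc
    have hmem : kv.1 ∈ (l.take 4).map Prod.fst := by
      simpa using List.contains_iff_mem.mp (Bool.of_not_eq_false hc)
    exact absurd (List.mem_map_of_mem hkv) (hdisj hmem)
  have hC : ∀ kv ∈ l.drop 4, S.contains kv.1 = true := by
    intro kv hkv; rw [hSd]
    exact List.contains_iff_mem.mpr (List.mem_map_of_mem hkv)
  conv_lhs => rw [hsplit]
  rw [List.foldl_append,
    loop_first F S (l.take 4) PySem.Dict.empty PySem.Dict.empty hA,
    loop_second F S (l.drop 4) _ PySem.Dict.empty hB hC]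
  rfl
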